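-- pv_equiv track=rewrite | github.com/ilkka-torma/diddy | experimental/tfg_nontriv.py | sft_language
-- ===== SOURCE A (Python) =====
-- def sft_language(sft, n):
--     alpha, forbs = sft
--     if n == 0:
--         yield ""
--         return
--     for w in sft_language(sft, n-1):
--         for a in alpha:
--             candidate = a + w
--             for f in forbs:
--                 if candidate[:len(f)] == f:
--                     break
--             else:
--                 yield candidate
-- ===== SOURCE B (Python) =====
-- def sft_language(sft, n):
--     # Bottom-up iterative build instead of top-down recursion; same emission order.
--     alpha, forbs = sft
--     words = [""]
--     for _ in range(n):
--         words = [a + w for w in words for a in alpha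
--                  if not any((a + w).startswith(f) for f in forbs)]
--     yield from words
-- ===== Notes on version B (the rewrite author's own statement) =====
-- stated objective: alternative
-- what changed: Replaces top-down recursion on n (with a for/else break loop over forbidden factors) by a bottom-up iterative fixpoint: start from [""] and apply the one-letter extension step n times, computing each generation with a flat comprehension filtered by startswith.
import Mathlib
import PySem

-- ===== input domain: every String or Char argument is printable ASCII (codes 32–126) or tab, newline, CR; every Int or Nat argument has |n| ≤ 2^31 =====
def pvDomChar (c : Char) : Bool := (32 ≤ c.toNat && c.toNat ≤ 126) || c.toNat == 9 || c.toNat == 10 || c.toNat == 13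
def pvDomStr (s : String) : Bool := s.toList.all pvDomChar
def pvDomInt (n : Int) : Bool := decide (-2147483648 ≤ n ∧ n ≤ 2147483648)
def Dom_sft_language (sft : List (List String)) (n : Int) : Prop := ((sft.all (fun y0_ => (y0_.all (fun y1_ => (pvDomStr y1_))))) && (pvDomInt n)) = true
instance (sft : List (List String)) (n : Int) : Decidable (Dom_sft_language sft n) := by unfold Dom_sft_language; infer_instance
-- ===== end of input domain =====

-- B replaces A's top-down recursion (with a for/else break over forbidden factors) by a
-- bottom-up iterative build of the word lists; same emission order (alternative, not faster).
-- A is a generator; the ports model list(sft_language(sft, n)).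

-- ===== PORT A =====
-- A: recursion on n; the for/else loop over forbs yields `candidate` iff no f is a matching prefix-slice.
def sftA_rec (alpha forbs : List String) : Nat → List String
  | 0 => [""]
  | Nat.succ k =>
    (sftA_rec alpha forbs k).foldl (fun acc w =>
      alpha.foldl (fun acc2 a =>
        let candidate := a ++ w
        if forbs.any (fun f =>
            PySem.Str.slice candidate none (some (PySem.Str.len f)) == f) then acc2
        else acc2 ++ [candidate]) acc) []

def sft_language (sft : List (List String)) (n : Int) : List String :=
  match sft with
  | [alpha, forbs] => sftA_rec alpha forbs n.toNat
  | _ => []  -- unpacking `alpha, forbs = sft` raises unless sft has exactly two elements (outside Pre_)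

-- ===== PORT B =====
def sftB_step (alpha forbs : List String) (words : List String) : List String :=
  words.flatMap (fun w =>
    (alpha.map (fun a => a ++ w)).filter (fun c =>
      !(forbs.any (fun f => PySem.Str.startswith c f))))

def sft_language_alt (sft : List (List String)) (n : Int) : List String :=
  -- `alpha, forbs = sft`: B raises unless sft has exactly two elements (outside Pre_)
  if sft.length = 2 then (sftB_step (sft.getD 0 []) (sft.getD 1 []))^[n.toNat] [""]
  else []

-- ===== PRECONDITION & SPEC =====
-- A raises ValueError unless sft unpacks into exactly two lists, and recurses forever (RecursionError) for n < 0.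
def Pre_sft_language (sft : List (List String)) (n : Int) : Prop := sft.length = 2 ∧ 0 ≤ n
instance (sft : List (List String)) (n : Int) : Decidable (Pre_sft_language sft n) := by
  unfold Pre_sft_language; infer_instance

def pvWitness_sft_language : List (List String) × Int := ([["a", "b"], ["aa"]], 2)


def Spec_sft_language (sft : List (List String)) (n : Int) (out : List String) : Prop := out = sft_language_alt sft n
instance (sft : List (List String)) (n : Int) (out : List String) : Decidable (Spec_sft_language sft n out) := by unfold Spec_sft_language; infer_instance

-- ===== CLAIM (what is proved, stated in full; the proofs are below) =====
def Claim_equal_sft_language : Prop := ∀ (sft : List (List String)) (n : Int), Dom_sft_language sft n → Pre_sft_language sft n → Spec_sft_language sft n (sft_language sft n)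


-- ===== LEMMAS AND PROOFS =====

-- A's slice-prefix test equals B's startswith test.
theorem sft_slice_eq_startswith (c f : String) :
    (PySem.Str.slice c none (some (PySem.Str.len f)) == f) = PySem.Str.startswith c f := by
  rw [Bool.eq_iff_iff, beq_iff_eq, PySem.Str.startswith_eq, PySem.Chars.startswith_iff]
  constructor
  · intro h
    have : c.toList.take f.toList.length = f.toList := by
      have := congrArg String.toList h
      simpa [PySem.Str.toList_slice, PySem.Chars.slice_eq_listSlice, PySem.Str.len,
        PySem.List.slice_to_natCast] using this
    exact this ▸ List.take_prefix _ _
  · intro h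
    have htake : f.toList = c.toList.take f.toList.length := List.prefix_iff_eq_take.mp h
    apply String.ext  -- toList injective
    simp [PySem.Str.toList_slice, PySem.Chars.slice_eq_listSlice, PySem.Str.len,
      PySem.List.slice_to_natCast]
    exact htake.symm

-- One generation of A's nested foldl equals B's flatMap/filter step.
theorem sftA_gen_eq_step (alpha forbs L : List String) :
    L.foldl (fun acc w =>
      alpha.foldl (fun acc2 a =>
        let candidate := a ++ w
        if forbs.any (fun f =>
            PySem.Str.slice candidate none (some (PySem.Str.len f)) == f) then acc2
        else acc2 ++ [candidate]) acc) [] = sftB_step alpha forbs L := by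
  unfold sftB_step
  have inner : ∀ (w : String) (acc : List String),
      alpha.foldl (fun acc2 a =>
        let candidate := a ++ w
        if forbs.any (fun f =>
            PySem.Str.slice candidate none (some (PySem.Str.len f)) == f) then acc2
        else acc2 ++ [candidate]) acc
      = acc ++ (alpha.map (fun a => a ++ w)).filter (fun c =>
          !(forbs.any (fun f => PySem.Str.startswith c f))) := by
    intro w acc
    simp only [sft_slice_eq_startswith]
    induction alpha generalizing acc with
    | nil => simp
    | cons a rest ih =>
      rw [List.foldl_cons, List.map_cons, List.filter_cons]
      cases h : forbs.any (fun f => PySem.Str.startswith (a ++ w) f) with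
      | true =>
        simp only [Bool.not_true, Bool.false_eq_true, if_true, if_false]
        exact ih acc
      | false =>
        simp only [Bool.not_false, Bool.false_eq_true, if_true, if_false]
        rw [ih]
        simp
  calc L.foldl (fun acc w =>
        alpha.foldl (fun acc2 a =>
          let candidate := a ++ w
          if forbs.any (fun f =>
              PySem.Str.slice candidate none (some (PySem.Str.len f)) == f) then acc2
          else acc2 ++ [candidate]) acc) []
      = L.foldl (fun acc w => acc ++ (alpha.map (fun a => a ++ w)).filter (fun c =>
          !(forbs.any (fun f => PySem.Str.startswith c f)))) [] := by
        apply PySem.List.foldl_congr_mem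
        intro acc w _; exact inner w acc
    _ = _ := by
        rw [PySem.List.foldl_append_eq_flatMap]; simp

theorem sftA_rec_eq_iter (alpha forbs : List String) (k : Nat) :
    sftA_rec alpha forbs k = (sftB_step alpha forbs)^[k] [""] := by
  induction k with
  | zero => simp [sftA_rec]
  | succ k ih =>
    rw [Function.iterate_succ_apply', ← ih]
    exact sftA_gen_eq_step alpha forbs (sftA_rec alpha forbs k)

-- ===== VERDICT (by name: the statement is the Claim_ definition above) =====
theorem sft_language_spec : Claim_equal_sft_language := by
  intro sft n _ hpre
  obtain ⟨hlen, -⟩ := hpre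
  match sft, hlen with
  | [alpha, forbs], _ =>
    unfold Spec_sft_language sft_language sft_language_alt
    simpa using sftA_rec_eq_iter alpha forbs n.toNat
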